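-- pv_equiv track=rewrite | github.com/Esteves31/ProjetoFinalGrafos | src/graph_utils.py | adjacentes_inc
-- ===== SOURCE A (Python) =====
-- def adjacentes_inc(v, nodes, I):
--     idx = nodes.index(v)
--     m = len(I[0])
--     viz = set()
--     for e in range(m):
--         if I[idx][e]:
--             for u_i, linha in enumerate(I):
--                 if u_i != idx and linha[e]:
--                     viz.add(nodes[u_i])
--     return list(viz)
-- ===== SOURCE B (Python) =====
-- def adjacentes_inc(v, nodes, I):
--     idx = nodes.index(v)
--     m = len(I[0])
--     viz = set()
--     for u_i, linha in enumerate(I):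
--         if u_i != idx and any(I[idx][e] and linha[e] for e in range(m)):
--             viz.add(nodes[u_i])
--     return sorted(viz)
-- ===== Notes on version B (the rewrite author's own statement) =====
-- stated objective: alternative
-- what changed: A loops edge-major (for each edge incident to v, scan all rows, mutating a set); B loops node-major: one pass over the rows, keeping node u iff some edge column is nonzero in both v's row and u's row (a short-circuit any over the columns), and returns the neighbour set sorted (A's list(set) order is interpreter-dependent, so B emits one determinate order; outputs are compared as sets).
import Mathlib
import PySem

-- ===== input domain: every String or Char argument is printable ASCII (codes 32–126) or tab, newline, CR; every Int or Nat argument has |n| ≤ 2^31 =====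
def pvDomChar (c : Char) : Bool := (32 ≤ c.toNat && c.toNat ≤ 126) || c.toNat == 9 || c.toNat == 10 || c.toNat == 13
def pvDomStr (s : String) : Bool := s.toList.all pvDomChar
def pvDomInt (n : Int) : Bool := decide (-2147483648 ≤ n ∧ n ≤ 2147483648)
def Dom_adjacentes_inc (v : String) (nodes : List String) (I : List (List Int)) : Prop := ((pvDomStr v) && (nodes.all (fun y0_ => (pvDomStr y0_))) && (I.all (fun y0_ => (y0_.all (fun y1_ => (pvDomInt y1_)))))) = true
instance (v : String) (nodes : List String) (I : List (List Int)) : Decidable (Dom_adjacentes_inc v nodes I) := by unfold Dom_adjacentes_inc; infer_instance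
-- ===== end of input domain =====

-- B replaces A's edge-major nested loops (for each incident edge, scan all rows mutating a set) with a
-- single node-major pass: keep node u iff some column is nonzero in both v's row and u's row, and emit
-- the neighbour set sorted (A's list(set) order is interpreter-dependent; both ports render that
-- unordered return canonically sorted — outputs are compared as sets).

-- ===== PORT A =====
-- list(viz): CPython's set iteration order is unspecified (hash-seed-dependent), so the port renders
-- the returned set in canonical sorted order; the behavioural comparison for this task is as a set.
def adjacentes_inc (v : String) (nodes : List String) (I : List (List Int)) : List String :=
  match PySem.List.index? nodes v with
  | none => []   -- ValueError: v not in nodes (excluded by Pre_)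
  | some idx =>
    match I with
    | [] => []   -- IndexError: I[0] of empty I (excluded by Pre_)
    | r0 :: _ =>
      -- m = len(I[0]) = r0.length; viz built edge-major exactly as A's nested loops
      let viz : PySem.Set String :=
        (List.range r0.length).foldl (fun viz e =>
          if (I.getD idx []).getD e 0 ≠ 0 then
            (PySem.List.enumerate I).foldl (fun viz p =>
              if p.1 ≠ (idx : Int) ∧ p.2.getD e 0 ≠ 0 then viz.add (nodes.getD p.1.toNat "")
              else viz) viz
          else viz) PySem.Set.empty
      PySem.List.sorted viz (fun x => x) false

-- ===== PORT B =====
-- 'for u_i, linha in enumerate(I): if u_i != idx and any(I[idx][e] and linha[e] for e in range(m)): viz.add(nodes[u_i])'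
-- as structural recursion over the rows with the running index u and the set accumulator viz
def adjAltGo (nodes : List String) (idx : Nat) (I : List (List Int)) (m : Nat) :
    List (List Int) → Nat → PySem.Set String → PySem.Set String
  | [], _, viz => viz
  | linha :: rest, u, viz =>
      adjAltGo nodes idx I m rest (u + 1)
        (if u ≠ idx ∧ (List.range m).any
            (fun e => decide ((I.getD idx []).getD e 0 ≠ 0) && decide (linha.getD e 0 ≠ 0)) = true
         then viz.add (nodes.getD u "")
         else viz)

def adjacentes_inc_alt (v : String) (nodes : List String) (I : List (List Int)) : List String :=
  match PySem.List.index? nodes v, I with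
  | some idx, r0 :: _ =>
      PySem.List.sorted (adjAltGo nodes idx I r0.length I 0 PySem.Set.empty) (fun x => x) false
  | _, _ => []   -- ValueError (v not in nodes) / IndexError (I[0] of empty I): excluded by Pre_

-- ===== PRECONDITION & SPEC =====
-- Pre_ is exactly where Python A returns: v found in nodes, I nonempty, and (when the edge loop runs,
-- i.e. len(I[0]) > 0) every index access A performs is in range: I[idx], I[idx][e] for e < m, and for
-- each e with I[idx][e] truthy, linha[e] for every row and nodes[u_i] for every matching row.
def Pre_adjacentes_inc (v : String) (nodes : List String) (I : List (List Int)) : Prop :=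
  v ∈ nodes ∧ I ≠ [] ∧
  ((I.getD 0 []).length = 0 ∨
    ((PySem.List.index? nodes v).getD 0 < I.length ∧
     (I.getD 0 []).length ≤ (I.getD ((PySem.List.index? nodes v).getD 0) []).length ∧
     ((List.range (I.getD 0 []).length).all (fun e =>
        ((I.getD ((PySem.List.index? nodes v).getD 0) []).getD e 0 == 0) ||
        (List.range I.length).all (fun u =>
          (u == (PySem.List.index? nodes v).getD 0) ||
          (decide (e < (I.getD u []).length) &&
           (((I.getD u []).getD e 0 == 0) || decide (u < nodes.length)))))) = true))
instance (v : String) (nodes : List String) (I : List (List Int)) : Decidable (Pre_adjacentes_inc v nodes I) := by unfold Pre_adjacentes_inc; infer_instance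

def pvWitness_adjacentes_inc : String × List String × List (List Int) := ("a", ["a", "b"], [[1], [1]])

def Spec_adjacentes_inc (v : String) (nodes : List String) (I : List (List Int)) (out : List String) : Prop := out = adjacentes_inc_alt v nodes I
instance (v : String) (nodes : List String) (I : List (List Int)) (out : List String) : Decidable (Spec_adjacentes_inc v nodes I out) := by unfold Spec_adjacentes_inc; infer_instance

-- ===== CLAIM (what is proved, stated in full; the proofs are below) =====
def Claim_equal_adjacentes_inc : Prop := ∀ (v : String) (nodes : List String) (I : List (List Int)), Dom_adjacentes_inc v nodes I → Pre_adjacentes_inc v nodes I → Spec_adjacentes_inc v nodes I (adjacentes_inc v nodes I)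

-- ===== LEMMAS AND PROOFS =====

-- membership in a foldl that conditionally adds to a PySem.Set (used for port A's loops)
theorem pv_mem_foldl {β : Type} (step : PySem.Set String → β → PySem.Set String)
    (P : β → String → Prop)
    (hstep : ∀ s b x, x ∈ step s b ↔ x ∈ s ∨ P b x) :
    ∀ (l : List β) (s0 : PySem.Set String) (x : String),
      x ∈ l.foldl step s0 ↔ x ∈ s0 ∨ ∃ b ∈ l, P b x := by
  intro l
  induction l with
  | nil => simp
  | cons b t ih =>
      intro s0 x
      simp only [List.foldl_cons, ih, hstep, List.mem_cons]
      constructor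
      · rintro ((h | h) | ⟨b', hb', hP⟩)
        exacts [Or.inl h, Or.inr ⟨b, Or.inl rfl, h⟩, Or.inr ⟨b', Or.inr hb', hP⟩]
      · rintro (h | ⟨b', (rfl | hb'), hP⟩)
        exacts [Or.inl (Or.inl h), Or.inl (Or.inr hP), Or.inr ⟨b', hb', hP⟩]

theorem pv_nodup_foldl {β : Type} (step : PySem.Set String → β → PySem.Set String)
    (hstep : ∀ (s : PySem.Set String) (b : β), s.Nodup → (step s b).Nodup) :
    ∀ (l : List β) (s0 : PySem.Set String), s0.Nodup → (l.foldl step s0).Nodup := by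
  intro l
  induction l with
  | nil => intro s0 h; simpa using h
  | cons b t ih => intro s0 h; exact ih _ (hstep _ _ h)

-- one conditional-add step: membership
theorem pv_mem_step (c : Prop) [Decidable c] (s : PySem.Set String) (a z : String) :
    (z ∈ if c then s.add a else s) ↔ z ∈ s ∨ (c ∧ a = z) := by
  split_ifs with h
  · rw [PySem.Set.mem_add]
    constructor
    · rintro (h1 | h1)
      · exact Or.inl h1
      · exact Or.inr ⟨h, h1.symm⟩
    · rintro (h1 | ⟨_, h1⟩)
      · exact Or.inl h1
      · exact Or.inr h1.symm
  · constructor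
    · exact Or.inl
    · rintro (h1 | ⟨h1, _⟩)
      · exact h1
      · exact absurd h1 h

-- one conditional-add step: nodup
theorem pv_nodup_step (c : Prop) [Decidable c] (s : PySem.Set String) (a : String)
    (hs : s.Nodup) : (if c then s.add a else s).Nodup := by
  split_ifs
  · exact PySem.Set.nodup_add _ _ hs
  · exact hs

-- membership in B's recursive pass
theorem pv_memB_go (nodes : List String) (idx : Nat) (I : List (List Int)) (m : Nat) :
    ∀ (l : List (List Int)) (u : Nat) (viz : PySem.Set String) (x : String),
      x ∈ adjAltGo nodes idx I m l u viz ↔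
        x ∈ viz ∨ ∃ (j : Nat) (_ : j < l.length),
          ((u + j ≠ idx ∧ (List.range m).any
              (fun e => decide ((I.getD idx []).getD e 0 ≠ 0) && decide ((l.getD j []).getD e 0 ≠ 0)) = true) ∧
            nodes.getD (u + j) "" = x) := by
  intro l
  induction l with
  | nil => simp [adjAltGo]
  | cons linha rest ih =>
      intro u viz x
      rw [adjAltGo, ih, pv_mem_step]
      constructor
      · rintro ((h | h) | ⟨j, hj, hP⟩)
        · exact Or.inl h
        · exact Or.inr ⟨0, by simp, by simpa using h⟩
        · refine Or.inr ⟨j + 1, by simpa using hj, ?_⟩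
          simpa [Nat.add_comm, Nat.add_left_comm, Nat.add_assoc] using hP
      · rintro (h | ⟨j, hj, hP⟩)
        · exact Or.inl (Or.inl h)
        · cases j with
          | zero => exact Or.inl (Or.inr (by simpa using hP))
          | succ j =>
              exact Or.inr ⟨j, by simpa using hj,
                by simpa [Nat.add_comm, Nat.add_left_comm, Nat.add_assoc] using hP⟩

theorem pv_nodupB_go (nodes : List String) (idx : Nat) (I : List (List Int)) (m : Nat) :
    ∀ (l : List (List Int)) (u : Nat) (viz : PySem.Set String),
      viz.Nodup → (adjAltGo nodes idx I m l u viz).Nodup := by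
  intro l
  induction l with
  | nil => intro u viz h; simpa [adjAltGo] using h
  | cons linha rest ih =>
      intro u viz h
      exact ih _ _ (pv_nodup_step _ _ _ h)

-- the two ports agree on EVERY input (Pre_ only marks where the Pythons return)
theorem pv_eq (v : String) (nodes : List String) (I : List (List Int)) :
    adjacentes_inc v nodes I = adjacentes_inc_alt v nodes I := by
  unfold adjacentes_inc adjacentes_inc_alt
  cases hidx : PySem.List.index? nodes v with
  | none => cases I <;> rfl
  | some idx =>
    cases I with
    | nil => rfl
    | cons r0 rest =>
      simp only
      apply PySem.List.sorted_eq_sorted_of_perm _ _ _ (fun a b h => h)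
      set I' := r0 :: rest with hI'
      have memA : ∀ x, x ∈ (List.range r0.length).foldl (fun viz e =>
            if (I'.getD idx []).getD e 0 ≠ 0 then
              (PySem.List.enumerate I').foldl (fun viz p =>
                if p.1 ≠ (idx : Int) ∧ p.2.getD e 0 ≠ 0 then viz.add (nodes.getD p.1.toNat "")
                else viz) viz
            else viz) PySem.Set.empty ↔
          ∃ e ∈ List.range r0.length, (I'.getD idx []).getD e 0 ≠ 0 ∧
            ∃ p ∈ PySem.List.enumerate I', (p.1 ≠ (idx : Int) ∧ p.2.getD e 0 ≠ 0) ∧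
              nodes.getD p.1.toNat "" = x := by
        intro x
        rw [pv_mem_foldl _ (fun e x => (I'.getD idx []).getD e 0 ≠ 0 ∧
              ∃ p ∈ PySem.List.enumerate I', (p.1 ≠ (idx : Int) ∧ p.2.getD e 0 ≠ 0) ∧
                nodes.getD p.1.toNat "" = x)]
        · simp [PySem.Set.empty]
        · intro s e y
          by_cases hc : (I'.getD idx []).getD e 0 ≠ 0
          · rw [if_pos hc]
            rw [pv_mem_foldl _ (fun p y => (p.1 ≠ (idx : Int) ∧ p.2.getD e 0 ≠ 0) ∧
                  nodes.getD p.1.toNat "" = y)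
                (fun s' p z => pv_mem_step _ s' (nodes.getD p.1.toNat "") z)]
            constructor
            · rintro (h | h)
              exacts [Or.inl h, Or.inr ⟨hc, h⟩]
            · rintro (h | ⟨_, h⟩)
              exacts [Or.inl h, Or.inr h]
          · rw [if_neg hc]
            constructor
            · exact Or.inl
            · rintro (h | ⟨h, _⟩)
              · exact h
              · exact absurd h hc
      have ndA := pv_nodup_foldl (fun viz e =>
            if (I'.getD idx []).getD e 0 ≠ 0 then
              (PySem.List.enumerate I').foldl (fun viz p =>
                if p.1 ≠ (idx : Int) ∧ p.2.getD e 0 ≠ 0 then viz.add (nodes.getD p.1.toNat "")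
                else viz) viz
            else viz)
        (fun s e hs => by
          by_cases hc : (I'.getD idx []).getD e 0 ≠ 0
          · simp only [if_pos hc]
            exact pv_nodup_foldl _
              (fun s' p hs' => pv_nodup_step _ s' (nodes.getD p.1.toNat "") hs') _ _ hs
          · simp only [if_neg hc]; exact hs)
        (List.range r0.length) PySem.Set.empty (by simp [PySem.Set.empty])
      have ndB := pv_nodupB_go nodes idx I' r0.length I' 0 PySem.Set.empty
        (by simp [PySem.Set.empty])
      rw [List.perm_ext_iff_of_nodup ndA ndB]
      intro x
      rw [memA, pv_memB_go]
      simp only [PySem.Set.empty, List.not_mem_nil, false_or, Nat.zero_add]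
      constructor
      · rintro ⟨e, he, hv, p, hp, ⟨hne, hval⟩, hname⟩
        rw [PySem.List.mem_enumerate_iff] at hp
        obtain ⟨k, hk, rfl⟩ := hp
        simp only [Int.zero_add, Int.toNat_natCast] at hname ⊢
        refine ⟨k, hk, ⟨?_, ?_⟩, ?_⟩
        · intro hcon; exact hne (by simp [hcon])
        · rw [List.any_eq_true]
          refine ⟨e, he, ?_⟩
          simp only [Bool.and_eq_true, decide_eq_true_eq]
          refine ⟨hv, ?_⟩
          simpa [List.getD_eq_getElem?_getD, hk] using hval
        · simpa using hname
      · rintro ⟨j, hj, ⟨hne, hany⟩, hname⟩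
        rw [List.any_eq_true] at hany
        obtain ⟨e, he, hval⟩ := hany
        simp only [Bool.and_eq_true, decide_eq_true_eq] at hval
        refine ⟨e, he, hval.1, ((j : Int), I'[j]), ?_, ⟨?_, ?_⟩, ?_⟩
        · rw [PySem.List.mem_enumerate_iff]; exact ⟨j, hj, by simp⟩
        · simpa using fun hcon => hne (by exact_mod_cast hcon)
        · simpa [List.getD_eq_getElem?_getD, hj] using hval.2
        · simpa using hname

-- ===== VERDICT (by name: the statement is the Claim_ definition above) =====
theorem adjacentes_inc_spec : Claim_equal_adjacentes_inc := by
  intro v nodes I _ _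
  unfold Spec_adjacentes_inc
  exact pv_eq v nodes I
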